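-- pv_equiv track=rewrite | github.com/rsalazar66a/CajaChicaColV2 | utils.py | validate_file_type
-- ===== SOURCE A (Python) =====
-- def validate_file_type(filename: str, content_type: str) -> bool:
--     """
--     Valida si un archivo es del tipo permitido
--
--     Args:
--         filename: Nombre del archivo
--         content_type: Tipo MIME del archivo (puede estar vacío)
--
--     Returns:
--         True si el archivo es válido
--     """
--     allowed_extensions = {'.jpg', '.jpeg', '.png', '.bmp', '.tiff', '.tif', '.pdf', '.heic', '.heif'}
--     allowed_types = {
--         'image/jpeg', 'image/jpg', 'image/png', 'image/bmp',
--         'image/tiff', 'image/tif', 'application/pdf',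
--         'image/heic', 'image/heif'
--     }
--
--     # Verificar extensión (principal)
--     if not any(filename.lower().endswith(ext) for ext in allowed_extensions):
--         return False
--
--     # Verificar tipo MIME solo si está presente
--     # Si content_type está vacío, confiamos en la extensión
--     if content_type and content_type not in allowed_types:
--         return False
--
--     return True
-- ===== SOURCE B (Python) =====
-- ALLOWED_EXTS = {'jpg', 'jpeg', 'png', 'bmp', 'tiff', 'tif', 'pdf', 'heic', 'heif'}
-- ALLOWED_TYPES = {
--     'image/jpeg', 'image/jpg', 'image/png', 'image/bmp',
--     'image/tiff', 'image/tif', 'application/pdf',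
--     'image/heic', 'image/heif'
-- }
--
--
-- def validate_file_type(filename: str, content_type: str) -> bool:
--     parts = filename.lower().rsplit('.', 1)
--     if len(parts) == 1 or parts[1] not in ALLOWED_EXTS:
--         return False
--     return (not content_type) or content_type in ALLOWED_TYPES
-- ===== Notes on version B (the rewrite author's own statement) =====
-- stated objective: idiomatic
-- what changed: Replaces the any-over-endswith scan of 9 dotted suffixes by deriving the extension once with rsplit('.', 1) and testing it against a set of bare extensions; the empty-tolerant MIME guard is folded into one boolean return.
import Mathlib
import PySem

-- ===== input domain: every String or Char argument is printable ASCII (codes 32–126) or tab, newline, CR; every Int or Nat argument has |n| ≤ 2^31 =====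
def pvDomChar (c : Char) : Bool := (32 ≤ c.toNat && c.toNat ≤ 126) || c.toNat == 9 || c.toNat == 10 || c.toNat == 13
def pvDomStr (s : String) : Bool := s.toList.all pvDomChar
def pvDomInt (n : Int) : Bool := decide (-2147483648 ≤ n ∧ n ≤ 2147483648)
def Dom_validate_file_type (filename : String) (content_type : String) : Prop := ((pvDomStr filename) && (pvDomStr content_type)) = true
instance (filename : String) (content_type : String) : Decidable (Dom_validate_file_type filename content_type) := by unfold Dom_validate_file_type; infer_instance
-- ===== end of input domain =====

-- B replaces A's any-over-endswith scan of dotted suffixes by computing the extension once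
-- (rsplit('.', 1)) and testing membership in a set of bare extensions (idiomatic rewrite).

-- ===== PORT A =====
def pvTypesA : List (List Char) :=
  ["image/jpeg".toList, "image/jpg".toList, "image/png".toList, "image/bmp".toList,
   "image/tiff".toList, "image/tif".toList, "application/pdf".toList,
   "image/heic".toList, "image/heif".toList]

def validate_file_type (filename : String) (content_type : String) : Bool :=
  let lw := PySem.Chars.lower filename.toList
  -- any(filename.lower().endswith(ext) for ext in allowed_extensions)
  if !(PySem.Chars.endswith lw ".jpg".toList || PySem.Chars.endswith lw ".jpeg".toList ||
       PySem.Chars.endswith lw ".png".toList || PySem.Chars.endswith lw ".bmp".toList ||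
       PySem.Chars.endswith lw ".tiff".toList || PySem.Chars.endswith lw ".tif".toList ||
       PySem.Chars.endswith lw ".pdf".toList || PySem.Chars.endswith lw ".heic".toList ||
       PySem.Chars.endswith lw ".heif".toList) then
    false
  else if !content_type.toList.isEmpty && !(pvTypesA.contains content_type.toList) then
    false
  else
    true

-- ===== PORT B =====
def pvExtsB : List (List Char) :=
  ["jpg".toList, "jpeg".toList, "png".toList, "bmp".toList, "tiff".toList,
   "tif".toList, "pdf".toList, "heic".toList, "heif".toList]

def pvTypesB : List (List Char) :=
  ["image/jpeg".toList, "image/jpg".toList, "image/png".toList, "image/bmp".toList,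
   "image/tiff".toList, "image/tif".toList, "application/pdf".toList,
   "image/heic".toList, "image/heif".toList]

def validate_file_type_alt (filename : String) (content_type : String) : Bool :=
  let name := PySem.Chars.lower filename.toList
  -- name.rsplit('.', 1), ported by hand (exact): split at the LAST '.' if there is one
  let rev := name.reverse
  if (rev.dropWhile (fun c => c != '.')).isEmpty then
    false  -- len(parts) == 1: no dot, no extension
  else
    let ext := (rev.takeWhile (fun c => c != '.')).reverse  -- parts[1]
    if !(pvExtsB.contains ext) then
      false
    else
      content_type.toList.isEmpty || pvTypesB.contains content_type.toList

-- ===== PRECONDITION & SPEC =====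
def Spec_validate_file_type (filename : String) (content_type : String) (out : Bool) : Prop := out = validate_file_type_alt filename content_type
instance (filename : String) (content_type : String) (out : Bool) : Decidable (Spec_validate_file_type filename content_type out) := by unfold Spec_validate_file_type; infer_instance

-- ===== CLAIM (what is proved, stated in full; the proofs are below) =====
def Claim_equal_validate_file_type : Prop := ∀ (filename : String) (content_type : String), Dom_validate_file_type filename content_type → Spec_validate_file_type filename content_type (validate_file_type filename content_type)

-- ===== LEMMAS AND PROOFS =====

-- a dot-free block followed by '.' is a prefix iff it is exactly the leading dot-free block
lemma pv_prefix_dot (d : List Char) (hd : '.' ∉ d) : ∀ r : List Char,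
    (d ++ ['.'] <+: r) ↔
      (r.takeWhile (fun c => c != '.') = d ∧ ¬ (r.dropWhile (fun c => c != '.')).isEmpty) := by
  induction d with
  | nil =>
      intro r
      cases r with
      | nil => simp
      | cons c t =>
          by_cases hc : c = '.'
          · simp [List.takeWhile, List.dropWhile, List.cons_prefix_cons, hc]
          · have hcb : (c != '.') = true := by simp [hc]
            simp [List.takeWhile, List.dropWhile, List.cons_prefix_cons, hcb]
            exact fun h => hc h.symm
  | cons a d ih =>
      intro r
      have ha : a ≠ '.' := by intro h; exact hd (h ▸ List.mem_cons_self)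
      have hd' : '.' ∉ d := fun h => hd (List.mem_cons_of_mem _ h)
      cases r with
      | nil => simp
      | cons c t =>
          by_cases hc : c = '.'
          · subst hc
            simp [List.takeWhile, List.dropWhile, List.cons_prefix_cons, ha]
          · have hcb : (c != '.') = true := by simp [hc]
            simp [List.takeWhile, List.dropWhile, List.cons_prefix_cons, hcb, ih hd' t,
              and_assoc]
            intro _ _; exact eq_comm

-- endswith a dotted extension, rephrased on the reversed list
lemma pv_ends_eq (e lw : List Char) (he : '.' ∉ e) :
    PySem.Chars.endswith lw ('.' :: e) =
      ((lw.reverse.takeWhile (fun c => c != '.') == e.reverse) &&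
       !(lw.reverse.dropWhile (fun c => c != '.')).isEmpty) := by
  have he' : '.' ∉ e.reverse := by simpa using he
  have key : ('.' :: e) <:+ lw ↔
      (lw.reverse.takeWhile (fun c => c != '.') = e.reverse ∧
        ¬ (lw.reverse.dropWhile (fun c => c != '.')).isEmpty) := by
    rw [← pv_prefix_dot e.reverse he' lw.reverse]
    constructor
    · intro h; have := h.reverse; simpa using this
    · intro h; have := h.reverse; simpa using this
  rw [Bool.eq_iff_iff, PySem.Chars.endswith_iff, key]
  simp

set_option maxRecDepth 8192 in
theorem validate_file_type_spec : Claim_equal_validate_file_type := by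
  intro filename content_type _
  unfold Spec_validate_file_type validate_file_type validate_file_type_alt
  simp only []
  rw [show (".jpg".toList) = '.' :: "jpg".toList from rfl,
      show (".jpeg".toList) = '.' :: "jpeg".toList from rfl,
      show (".png".toList) = '.' :: "png".toList from rfl,
      show (".bmp".toList) = '.' :: "bmp".toList from rfl,
      show (".tiff".toList) = '.' :: "tiff".toList from rfl,
      show (".tif".toList) = '.' :: "tif".toList from rfl,
      show (".pdf".toList) = '.' :: "pdf".toList from rfl,
      show (".heic".toList) = '.' :: "heic".toList from rfl,
      show (".heif".toList) = '.' :: "heif".toList from rfl,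
      pv_ends_eq _ _ (by decide), pv_ends_eq _ _ (by decide), pv_ends_eq _ _ (by decide),
      pv_ends_eq _ _ (by decide), pv_ends_eq _ _ (by decide), pv_ends_eq _ _ (by decide),
      pv_ends_eq _ _ (by decide), pv_ends_eq _ _ (by decide), pv_ends_eq _ _ (by decide)]
  set lw := PySem.Chars.lower filename.toList with hlw
  set stem := lw.reverse.takeWhile (fun c => c != '.') with hstem
  set dp := lw.reverse.dropWhile (fun c => c != '.') with hdp
  by_cases hempty : dp.isEmpty
  · simp [hempty]
  · have hempty' : dp.isEmpty = false := by simpa using hempty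
    have hrev : ∀ e : List Char, (stem.reverse == e) = (stem == e.reverse) := by
      intro e
      rw [Bool.eq_iff_iff]
      simp [List.reverse_eq_iff]
    have hcont : pvExtsB.contains stem.reverse =
        (stem == "jpg".toList.reverse || stem == "jpeg".toList.reverse ||
         stem == "png".toList.reverse || stem == "bmp".toList.reverse ||
         stem == "tiff".toList.reverse || stem == "tif".toList.reverse ||
         stem == "pdf".toList.reverse || stem == "heic".toList.reverse ||
         stem == "heif".toList.reverse) := by
      simp only [pvExtsB, List.contains_cons, List.contains_nil, Bool.or_false, hrev,
        Bool.or_assoc]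
    rw [hempty']
    simp only [Bool.not_false, Bool.and_true]
    rw [hcont]
    have hT : pvTypesB = pvTypesA := rfl
    by_cases hext : (stem == "jpg".toList.reverse || stem == "jpeg".toList.reverse ||
         stem == "png".toList.reverse || stem == "bmp".toList.reverse ||
         stem == "tiff".toList.reverse || stem == "tif".toList.reverse ||
         stem == "pdf".toList.reverse || stem == "heic".toList.reverse ||
         stem == "heif".toList.reverse) = true
    · rw [hext]
      cases hct : content_type.toList.isEmpty <;>
        cases hm : pvTypesA.contains content_type.toList <;>
          simp [hT, hct, hm] <;> simpa using hm
    · rw [Bool.not_eq_true] at hext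
      rw [hext]
      simp
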